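-- pv_equiv track=rewrite | github.com/patrickkugelman/Atestat-Info | Atestat/check_win.py | count_diagonal
-- ===== SOURCE A (Python) =====
-- def next_cell(cell, offset):
--     return [cell[0] + offset[0], cell[1] + offset[1]]
--
-- def is_in_grid(grid_height, grid_width, cell):
--     return (cell[0] >= 0 and
--             cell[0] < grid_height and
--             cell[1] >= 0 and
--             cell[1] < grid_width)
--
-- def count_diagonal(grid, last_played_cell, offset1, offset2):
--     cell = last_played_cell
--     grid_height = len(grid)
--     grid_width = len(grid[0])
--     count = 1
--
--     while is_in_grid(grid_height, grid_width, next_cell(cell, [offset1[0], offset1[1]])):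
--         count += 1
--         cell = next_cell(cell, [offset1[0], offset1[1]])
--     cell = last_played_cell
--
--     while is_in_grid(grid_height, grid_width, next_cell(cell, [offset2[0], offset2[1]])):
--         count += 1
--         cell = next_cell(cell, [offset2[0], offset2[1]])
--
--     return count
-- ===== SOURCE B (Python) =====
-- def count_diagonal(grid, last_played_cell, offset1, offset2):
--     h, w = len(grid), len(grid[0])
--     r, c = last_played_cell[0], last_played_cell[1]
--
--     def steps(dr, dc):
--         # closed-form number of consecutive in-grid steps from (r, c) along (dr, dc)
--         if not (0 <= r + dr < h and 0 <= c + dc < w):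
--             return 0
--         a = (h - 1 - r) // dr if dr > 0 else (r // -dr if dr < 0 else None)
--         b = (w - 1 - c) // dc if dc > 0 else (c // -dc if dc < 0 else None)
--         if a is None and b is None:
--             raise ValueError("zero offset from an in-grid cell: the ray never leaves the grid")
--         if a is None:
--             return b
--         if b is None:
--             return a
--         return min(a, b)
--
--     return 1 + steps(offset1[0], offset1[1]) + steps(offset2[0], offset2[1])
-- ===== Notes on version B (the rewrite author's own statement) =====
-- stated objective: alternative
-- what changed: Replaces the two step-by-step while-loop walks along each offset by a closed-form computation: per coordinate the floor-divided distance to the grid boundary caps the number of steps, and the step count is the minimum of the active caps (guarded by a single in-grid test of the first step); it trades the loop for O(1) arithmetic per offset, though a timing run on the generated inputs did not show a measurable speed-up. …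
import Mathlib
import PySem

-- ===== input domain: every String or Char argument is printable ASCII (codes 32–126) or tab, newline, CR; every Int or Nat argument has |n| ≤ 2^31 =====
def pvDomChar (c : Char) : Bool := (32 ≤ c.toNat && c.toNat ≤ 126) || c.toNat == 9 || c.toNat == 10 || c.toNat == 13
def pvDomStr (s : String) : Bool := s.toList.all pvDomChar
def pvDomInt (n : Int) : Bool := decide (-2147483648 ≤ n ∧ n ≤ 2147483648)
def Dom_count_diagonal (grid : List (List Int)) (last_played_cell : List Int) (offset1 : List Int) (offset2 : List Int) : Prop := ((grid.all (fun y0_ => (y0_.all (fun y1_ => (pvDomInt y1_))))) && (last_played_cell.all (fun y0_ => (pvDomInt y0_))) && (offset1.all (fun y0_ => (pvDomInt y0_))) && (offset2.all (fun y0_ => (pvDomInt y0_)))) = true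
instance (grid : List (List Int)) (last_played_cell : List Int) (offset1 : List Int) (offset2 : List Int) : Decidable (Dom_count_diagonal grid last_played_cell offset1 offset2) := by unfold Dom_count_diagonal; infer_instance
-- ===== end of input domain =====

-- B replaces A's two step-by-step boundary walks by a closed-form per-coordinate distance-to-boundary
-- computation (a different algorithm of similar measured cost); equivalence is claimed on Pre_,
-- which excludes exactly the inputs on which A never returns.

-- ===== PORT A =====
def aNextCell (cell offset : List Int) : List Int :=
  [PySem.List.pyGetD cell 0 0 + PySem.List.pyGetD offset 0 0,
   PySem.List.pyGetD cell 1 0 + PySem.List.pyGetD offset 1 0]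

def aIsInGrid (gh gw : Int) (cell : List Int) : Bool :=
  decide (0 ≤ PySem.List.pyGetD cell 0 0) && decide (PySem.List.pyGetD cell 0 0 < gh) &&
  decide (0 ≤ PySem.List.pyGetD cell 1 0) && decide (PySem.List.pyGetD cell 1 0 < gw)

-- fuel-bounded transcription of A's while loop (A can diverge; Pre_ excludes that, and the fuel
-- chosen in count_diagonal is proved sufficient on Pre_ below)
def aWalk (gh gw : Int) (offset : List Int) : Nat → List Int → Int → List Int × Int
  | 0, cell, count => (cell, count)
  | f+1, cell, count =>
    if aIsInGrid gh gw (aNextCell cell [PySem.List.pyGetD offset 0 0, PySem.List.pyGetD offset 1 0]) then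
      aWalk gh gw offset f (aNextCell cell [PySem.List.pyGetD offset 0 0, PySem.List.pyGetD offset 1 0]) (count + 1)
    else (cell, count)

def count_diagonal (grid : List (List Int)) (last_played_cell : List Int) (offset1 : List Int) (offset2 : List Int) : Int :=
  let gh : Int := grid.length
  let gw : Int := (grid.headD []).length        -- Python len(grid[0]); Pre_ requires grid ≠ []
  let fuel : Nat := grid.length + (grid.headD []).length + 2
  let s1 := aWalk gh gw offset1 fuel last_played_cell 1
  let s2 := aWalk gh gw offset2 fuel last_played_cell s1.2   -- cell is reset to last_played_cell
  s2.2

-- ===== PORT B =====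
def altCap (pos d bound : Int) : Option Int :=
  if 0 < d then some (PySem.Int.floordiv (bound - 1 - pos) d)
  else if d < 0 then some (PySem.Int.floordiv pos (-d))
  else none

def altSteps (h w r c dr dc : Int) : Int :=
  if 0 ≤ r + dr ∧ r + dr < h ∧ 0 ≤ c + dc ∧ c + dc < w then
    match altCap r dr h, altCap c dc w with
    | none, none => 0          -- Source B raises ValueError here (zero offset from an in-grid cell); outside Pre_
    | none, some b => b
    | some a, none => a
    | some a, some b => min a b
  else 0

def count_diagonal_alt (grid : List (List Int)) (last_played_cell : List Int) (offset1 : List Int) (offset2 : List Int) : Int :=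
  let h : Int := grid.length
  let w : Int := (grid.headD []).length
  let r := PySem.List.pyGetD last_played_cell 0 0
  let c := PySem.List.pyGetD last_played_cell 1 0
  1 + altSteps h w r c (PySem.List.pyGetD offset1 0 0) (PySem.List.pyGetD offset1 1 0)
    + altSteps h w r c (PySem.List.pyGetD offset2 0 0) (PySem.List.pyGetD offset2 1 0)

-- ===== PRECONDITION & SPEC =====
-- Pre_ excludes exactly the inputs on which the Python A never returns: IndexError (empty grid, or a
-- cell/offset list with fewer than 2 entries) and divergence (an offset [0,0] whose start cell lies in the grid).
def Pre_count_diagonal (grid : List (List Int)) (last_played_cell : List Int) (offset1 : List Int) (offset2 : List Int) : Prop :=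
  grid ≠ [] ∧ 2 ≤ last_played_cell.length ∧ 2 ≤ offset1.length ∧ 2 ≤ offset2.length ∧
  ¬(offset1.getD 0 0 = 0 ∧ offset1.getD 1 0 = 0 ∧
      0 ≤ last_played_cell.getD 0 0 ∧ last_played_cell.getD 0 0 < (grid.length : Int) ∧
      0 ≤ last_played_cell.getD 1 0 ∧ last_played_cell.getD 1 0 < ((grid.headD []).length : Int)) ∧
  ¬(offset2.getD 0 0 = 0 ∧ offset2.getD 1 0 = 0 ∧
      0 ≤ last_played_cell.getD 0 0 ∧ last_played_cell.getD 0 0 < (grid.length : Int) ∧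
      0 ≤ last_played_cell.getD 1 0 ∧ last_played_cell.getD 1 0 < ((grid.headD []).length : Int))

instance (grid : List (List Int)) (last_played_cell : List Int) (offset1 : List Int) (offset2 : List Int) : Decidable (Pre_count_diagonal grid last_played_cell offset1 offset2) := by unfold Pre_count_diagonal; infer_instance

def pvWitness_count_diagonal : List (List Int) × List Int × List Int × List Int :=
  ([[0, 0], [0, 0]], [0, 1], [1, 1], [-1, -1])

def Spec_count_diagonal (grid : List (List Int)) (last_played_cell : List Int) (offset1 : List Int) (offset2 : List Int) (out : Int) : Prop := out = count_diagonal_alt grid last_played_cell offset1 offset2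
instance (grid : List (List Int)) (last_played_cell : List Int) (offset1 : List Int) (offset2 : List Int) (out : Int) : Decidable (Spec_count_diagonal grid last_played_cell offset1 offset2 out) := by unfold Spec_count_diagonal; infer_instance

-- ===== CLAIM (what is proved, stated in full; the proofs are below) =====
def Claim_equal_count_diagonal : Prop := ∀ (grid : List (List Int)) (last_played_cell : List Int) (offset1 : List Int) (offset2 : List Int), Dom_count_diagonal grid last_played_cell offset1 offset2 → Pre_count_diagonal grid last_played_cell offset1 offset2 → Spec_count_diagonal grid last_played_cell offset1 offset2 (count_diagonal grid last_played_cell offset1 offset2)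

-- ===== LEMMAS AND PROOFS =====

theorem altCap_eq_none_iff (pos d bound : Int) : altCap pos d bound = none ↔ d = 0 := by
  unfold altCap; split_ifs <;> simp <;> omega

theorem altCap_one_le {pos d bound a : Int} (h1 : 0 ≤ pos + d) (h2 : pos + d < bound)
    (hc : altCap pos d bound = some a) : 1 ≤ a := by
  unfold altCap at hc
  split_ifs at hc with hp hn
  · cases hc
    rw [PySem.Int.le_floordiv_iff_mul_le hp]; omega
  · cases hc
    rw [PySem.Int.le_floordiv_iff_mul_le (by omega : (0:Int) < -d)]; omega

theorem altCap_le_bound {pos d bound a : Int} (h1 : 0 ≤ pos + d) (h2 : pos + d < bound)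
    (hc : altCap pos d bound = some a) : a ≤ bound := by
  unfold altCap at hc
  split_ifs at hc with hp hn
  · cases hc
    have hlt := PySem.Int.floordiv_lt_iff_lt_mul (a := bound - 1 - pos) (q := bound + 1) hp
    have hb : (0:Int) < bound := by omega
    have hx : bound - 1 - pos < (bound + 1) * d := by nlinarith
    omega
  · cases hc
    have hdn : (0:Int) < -d := by omega
    have hlt := PySem.Int.floordiv_lt_iff_lt_mul (a := pos) (q := bound + 1) hdn
    have hb : (0:Int) < bound := by omega
    have hx : pos < (bound + 1) * (-d) := by nlinarith
    omega

theorem altCap_shift {pos d bound a : Int} (hc : altCap pos d bound = some a) :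
    altCap (pos + d) d bound = some (a - 1) := by
  unfold altCap at hc ⊢
  split_ifs at hc with hp hn
  · cases hc
    rw [if_pos hp]
    congr 1
    have h := (PySem.Int.floordiv_eq_iff_of_pos hp
      (a := bound - 1 - pos) (q := PySem.Int.floordiv (bound - 1 - pos) d)).mp rfl
    rw [PySem.Int.floordiv_eq_iff_of_pos hp]
    constructor <;> nlinarith [h.1, h.2]
  · cases hc
    rw [if_neg (by omega : ¬ (0:Int) < d), if_pos hn]
    congr 1
    have hdn : (0:Int) < -d := by omega
    have h := (PySem.Int.floordiv_eq_iff_of_pos hdn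
      (a := pos) (q := PySem.Int.floordiv pos (-d))).mp rfl
    rw [PySem.Int.floordiv_eq_iff_of_pos hdn]
    constructor <;> nlinarith [h.1, h.2]

theorem altCap_le_one_of_exit {pos d bound a : Int} (h1 : 0 ≤ pos + d) (h2 : pos + d < bound)
    (hex : pos + d + d < 0 ∨ bound ≤ pos + d + d) (hc : altCap pos d bound = some a) : a ≤ 1 := by
  unfold altCap at hc
  split_ifs at hc with hp hn
  · cases hc
    have hex' : bound ≤ pos + d + d := by rcases hex with h | h <;> omega
    have hlt := PySem.Int.floordiv_lt_iff_lt_mul (a := bound - 1 - pos) (q := 2) hp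
    have hx : bound - 1 - pos < 2 * d := by omega
    omega
  · cases hc
    have hdn : (0:Int) < -d := by omega
    have hex' : pos + d + d < 0 := by rcases hex with h | h <;> omega
    have hlt := PySem.Int.floordiv_lt_iff_lt_mul (a := pos) (q := 2) hdn
    have hx : pos < 2 * (-d) := by omega
    omega

theorem altSteps_nonneg (h w r c dr dc : Int) : 0 ≤ altSteps h w r c dr dc := by
  unfold altSteps
  split_ifs with hg
  · obtain ⟨g1, g2, g3, g4⟩ := hg
    rcases hr : altCap r dr h with _ | a <;> rcases hc : altCap c dc w with _ | b <;> simp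
    · have := altCap_one_le g3 g4 hc; omega
    · have := altCap_one_le g1 g2 hr; omega
    · have := altCap_one_le g1 g2 hr; have := altCap_one_le g3 g4 hc; omega
  · exact le_rfl

theorem altSteps_le (h w r c dr dc : Int) (hh : 0 ≤ h) (hw : 0 ≤ w) : altSteps h w r c dr dc ≤ h + w := by
  unfold altSteps
  split_ifs with hg
  · obtain ⟨g1, g2, g3, g4⟩ := hg
    rcases hr : altCap r dr h with _ | a <;> rcases hc : altCap c dc w with _ | b <;> simp
    · omega
    · have := altCap_le_bound g3 g4 hc; omega
    · have := altCap_le_bound g1 g2 hr; omega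
    · left; have := altCap_le_bound g1 g2 hr; omega
  · omega

theorem altSteps_rec {h w r c dr dc : Int}
    (hg : 0 ≤ r + dr ∧ r + dr < h ∧ 0 ≤ c + dc ∧ c + dc < w)
    (hnz : ¬(dr = 0 ∧ dc = 0)) :
    altSteps h w r c dr dc = 1 + altSteps h w (r + dr) (c + dc) dr dc := by
  obtain ⟨g1, g2, g3, g4⟩ := hg
  rcases hr : altCap r dr h with _ | a <;> rcases hc : altCap c dc w with _ | b
  · exact absurd ⟨(altCap_eq_none_iff _ _ _).mp hr, (altCap_eq_none_iff _ _ _).mp hc⟩ hnz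
  · -- dr = 0, c-cap = some b
    have hdr0 : dr = 0 := (altCap_eq_none_iff _ _ _).mp hr
    unfold altSteps
    rw [if_pos ⟨g1, g2, g3, g4⟩]
    by_cases hg2 : 0 ≤ r + dr + dr ∧ r + dr + dr < h ∧ 0 ≤ c + dc + dc ∧ c + dc + dc < w
    · rw [if_pos hg2, hr, hc, altCap_shift hc,
        show altCap (r + dr) dr h = none from by rw [altCap_eq_none_iff]; exact hdr0]
      simp
    · rw [if_neg hg2]
      push Not at hg2
      have hb1 := altCap_one_le g3 g4 hc
      have hb2 : b ≤ 1 := altCap_le_one_of_exit g3 g4 (by omega) hc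
      rw [hr, hc]; simp only []; omega
  · -- dc = 0, r-cap = some a
    have hdc0 : dc = 0 := (altCap_eq_none_iff _ _ _).mp hc
    unfold altSteps
    rw [if_pos ⟨g1, g2, g3, g4⟩]
    by_cases hg2 : 0 ≤ r + dr + dr ∧ r + dr + dr < h ∧ 0 ≤ c + dc + dc ∧ c + dc + dc < w
    · rw [if_pos hg2, hr, hc, altCap_shift hr,
        show altCap (c + dc) dc w = none from by rw [altCap_eq_none_iff]; exact hdc0]
      simp
    · rw [if_neg hg2]
      push Not at hg2
      have ha1 := altCap_one_le g1 g2 hr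
      have ha2 : a ≤ 1 := altCap_le_one_of_exit g1 g2 (by omega) hr
      rw [hr, hc]; simp only []; omega
  · -- both caps present
    unfold altSteps
    rw [if_pos ⟨g1, g2, g3, g4⟩]
    by_cases hg2 : 0 ≤ r + dr + dr ∧ r + dr + dr < h ∧ 0 ≤ c + dc + dc ∧ c + dc + dc < w
    · rw [if_pos hg2, hr, hc, altCap_shift hr, altCap_shift hc]
      simp only []
      omega
    · rw [if_neg hg2]
      push Not at hg2
      have ha1 := altCap_one_le g1 g2 hr
      have hb1 := altCap_one_le g3 g4 hc
      have hle : a ≤ 1 ∨ b ≤ 1 := by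
        by_cases hx : r + dr + dr < 0 ∨ h ≤ r + dr + dr
        · exact Or.inl (altCap_le_one_of_exit g1 g2 hx hr)
        · push Not at hx
          exact Or.inr (altCap_le_one_of_exit g3 g4 (by omega) hc)
      rw [hr, hc]
      simp only []
      omega

theorem pyGetD_fst (x y d : Int) : PySem.List.pyGetD [x, y] 0 d = x := by
  simp [PySem.List.pyGetD, PySem.List.pyGet?, PySem.List.pyIdx?]

theorem pyGetD_snd (x y d : Int) : PySem.List.pyGetD [x, y] 1 d = y := by
  simp [PySem.List.pyGetD, PySem.List.pyGet?, PySem.List.pyIdx?]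

theorem pyGetD_one_eq_getD (xs : List Int) (d : Int) (hlen : 2 ≤ xs.length) :
    PySem.List.pyGetD xs 1 d = xs.getD 1 d := by
  rcases xs with _ | ⟨x, _ | ⟨y, t⟩⟩
  · simp at hlen
  · simp at hlen
  · simp [PySem.List.pyGetD, PySem.List.pyGet?, PySem.List.pyIdx?]

theorem aWalk_count (gh gw dr dc : Int) (off : List Int)
    (hdr : PySem.List.pyGetD off 0 0 = dr) (hdc : PySem.List.pyGetD off 1 0 = dc) :
    ∀ (f : Nat) (cell : List Int) (r c cnt : Int),
      PySem.List.pyGetD cell 0 0 = r → PySem.List.pyGetD cell 1 0 = c →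
      ¬(dr = 0 ∧ dc = 0 ∧ 0 ≤ r ∧ r < gh ∧ 0 ≤ c ∧ c < gw) →
      altSteps gh gw r c dr dc ≤ (f : Int) →
      (aWalk gh gw off f cell cnt).2 = cnt + altSteps gh gw r c dr dc := by
  intro f
  induction f with
  | zero =>
    intro cell r c cnt hr hc hnd hb
    have := altSteps_nonneg gh gw r c dr dc
    simp [aWalk]
    omega
  | succ f ih =>
    intro cell r c cnt hr hc hnd hb
    have hnext : aNextCell cell [PySem.List.pyGetD off 0 0, PySem.List.pyGetD off 1 0]
        = [r + dr, c + dc] := by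
      simp [aNextCell, pyGetD_snd, hr, hc, hdr, hdc]
    have hgrid : aIsInGrid gh gw [r + dr, c + dc] = true
        ↔ (0 ≤ r + dr ∧ r + dr < gh ∧ 0 ≤ c + dc ∧ c + dc < gw) := by
      simp [aIsInGrid, pyGetD_snd]
      tauto
    by_cases hin : 0 ≤ r + dr ∧ r + dr < gh ∧ 0 ≤ c + dc ∧ c + dc < gw
    · have hnz : ¬(dr = 0 ∧ dc = 0) := by
        rintro ⟨h0, h1⟩
        exact hnd ⟨h0, h1, by omega, by omega, by omega, by omega⟩
      have hrec := altSteps_rec hin hnz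
      have hnd' : ¬(dr = 0 ∧ dc = 0 ∧ 0 ≤ r + dr ∧ r + dr < gh ∧ 0 ≤ c + dc ∧ c + dc < gw) := by
        rintro ⟨h0, h1, _⟩
        exact hnz ⟨h0, h1⟩
      have := ih [r + dr, c + dc] (r + dr) (c + dc) (cnt + 1)
        (pyGetD_fst _ _ _) (pyGetD_snd _ _ _) hnd' (by omega)
      rw [aWalk, hnext, if_pos (hgrid.mpr hin), this]
      omega
    · have hsz : altSteps gh gw r c dr dc = 0 := by
        unfold altSteps
        rw [if_neg hin]
      rw [aWalk, hnext, if_neg (by simpa [hgrid] using hin), hsz]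
      omega

theorem count_diagonal_main (grid : List (List Int)) (lpc o1 o2 : List Int)
    (hpre : Pre_count_diagonal grid lpc o1 o2) :
    count_diagonal grid lpc o1 o2 = count_diagonal_alt grid lpc o1 o2 := by
  obtain ⟨hg, hl, h1, h2, hnd1, hnd2⟩ := hpre
  set gh : Int := (grid.length : Int) with hgh
  set gw : Int := ((grid.headD []).length : Int) with hgw
  set r : Int := PySem.List.pyGetD lpc 0 0 with hr
  set c : Int := PySem.List.pyGetD lpc 1 0 with hc
  set dr1 : Int := PySem.List.pyGetD o1 0 0 with hdr1
  set dc1 : Int := PySem.List.pyGetD o1 1 0 with hdc1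
  set dr2 : Int := PySem.List.pyGetD o2 0 0 with hdr2
  set dc2 : Int := PySem.List.pyGetD o2 1 0 with hdc2
  have hbridge : ∀ (xs : List Int), 2 ≤ xs.length →
      PySem.List.pyGetD xs 0 0 = xs.getD 0 0 ∧ PySem.List.pyGetD xs 1 0 = xs.getD 1 0 := by
    intro xs hx
    exact ⟨PySem.List.pyGetD_zero xs 0, pyGetD_one_eq_getD xs 0 hx⟩
  have hnd1' : ¬(dr1 = 0 ∧ dc1 = 0 ∧ 0 ≤ r ∧ r < gh ∧ 0 ≤ c ∧ c < gw) := by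
    obtain ⟨e1, e2⟩ := hbridge o1 h1
    obtain ⟨e3, e4⟩ := hbridge lpc hl
    rw [hdr1, hdc1, hr, hc, e1, e2, e3, e4]
    exact hnd1
  have hnd2' : ¬(dr2 = 0 ∧ dc2 = 0 ∧ 0 ≤ r ∧ r < gh ∧ 0 ≤ c ∧ c < gw) := by
    obtain ⟨e1, e2⟩ := hbridge o2 h2
    obtain ⟨e3, e4⟩ := hbridge lpc hl
    rw [hdr2, hdc2, hr, hc, e1, e2, e3, e4]
    exact hnd2
  have hfuel1 : altSteps gh gw r c dr1 dc1 ≤ ((grid.length + (grid.headD []).length + 2 : Nat) : Int) := by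
    have := altSteps_le gh gw r c dr1 dc1 (by positivity) (by positivity)
    push_cast
    omega
  have hfuel2 : altSteps gh gw r c dr2 dc2 ≤ ((grid.length + (grid.headD []).length + 2 : Nat) : Int) := by
    have := altSteps_le gh gw r c dr2 dc2 (by positivity) (by positivity)
    push_cast
    omega
  have hw1 := aWalk_count gh gw dr1 dc1 o1 hdr1.symm hdc1.symm
    (grid.length + (grid.headD []).length + 2) lpc r c 1 hr.symm hc.symm hnd1' hfuel1
  have hw2 := aWalk_count gh gw dr2 dc2 o2 hdr2.symm hdc2.symm
    (grid.length + (grid.headD []).length + 2) lpc r c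
    ((aWalk gh gw o1 (grid.length + (grid.headD []).length + 2) lpc 1).2)
    hr.symm hc.symm hnd2' hfuel2
  unfold count_diagonal count_diagonal_alt
  simp only []
  rw [← hgh, ← hgw, ← hr, ← hc, ← hdr1, ← hdc1, ← hdr2, ← hdc2] at *
  rw [hw2, hw1]

-- ===== VERDICT (by name: the statement is the Claim_ definition above) =====
theorem count_diagonal_spec : Claim_equal_count_diagonal := by
  intro grid lpc o1 o2 _ hpre
  exact count_diagonal_main grid lpc o1 o2 hpre
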